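-- pv_equiv track=rewrite | github.com/shanayatunk/Feelori-WhatsApp-Chatz | backend/app/server.py | _analyze_interactive_intent
-- ===== SOURCE A (Python) =====
-- def _analyze_interactive_intent(message: str) -> str:
--     """Analyze intent for interactive messages based on their prefix."""
--     # This dictionary should already exist in your file, but is included for completeness
--     INTERACTIVE_PREFIXES = {
--         "buy_": "interactive_button_reply",
--         "more_": "interactive_button_reply",
--         "similar_": "interactive_button_reply",
--         "option_": "interactive_button_reply",
--         "product_": "product_detail"
--     }
--     for prefix, intent in INTERACTIVE_PREFIXES.items():
--         if message.startswith(prefix):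
--             return intent
--     return "interactive_response"
-- ===== SOURCE B (Python) =====
-- INTERACTIVE_PREFIXES = {
--     "buy_": "interactive_button_reply",
--     "more_": "interactive_button_reply",
--     "similar_": "interactive_button_reply",
--     "option_": "interactive_button_reply",
--     "product_": "product_detail"
-- }
--
--
-- def _analyze_interactive_intent(message: str) -> str:
--     """Analyze intent for interactive messages: one computed-key dict lookup."""
--     i = message.find("_")
--     if i == -1:
--         return "interactive_response"
--     return INTERACTIVE_PREFIXES.get(message[:i + 1], "interactive_response")
-- ===== Notes on version B (the rewrite author's own statement) =====
-- stated objective: idiomatic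
-- what changed: Replaces A's linear scan over the prefix table (one startswith test per entry) with a single computed-key dictionary lookup on the text up to and including the first underscore.
import Mathlib
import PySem

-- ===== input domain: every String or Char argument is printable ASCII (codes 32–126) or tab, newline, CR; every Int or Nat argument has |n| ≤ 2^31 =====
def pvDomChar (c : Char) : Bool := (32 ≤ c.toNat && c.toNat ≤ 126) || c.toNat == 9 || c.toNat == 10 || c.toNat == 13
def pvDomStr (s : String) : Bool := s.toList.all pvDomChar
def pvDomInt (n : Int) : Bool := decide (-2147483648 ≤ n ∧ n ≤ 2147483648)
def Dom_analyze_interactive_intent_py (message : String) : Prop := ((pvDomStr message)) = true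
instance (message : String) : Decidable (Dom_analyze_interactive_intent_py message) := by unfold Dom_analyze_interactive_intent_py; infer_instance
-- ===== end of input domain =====

-- B replaces A's linear scan of the prefix table (startswith per entry) by a single
-- computed-key dictionary lookup on the text up to and including the first '_' (idiomatic).

-- ===== PORT A =====
-- the prefix -> intent table A builds inside the function (dict, insertion order)
def pvInteractivePrefixes : PySem.Dict String String :=
  PySem.Dict.ofList
    [("buy_", "interactive_button_reply"),
     ("more_", "interactive_button_reply"),
     ("similar_", "interactive_button_reply"),
     ("option_", "interactive_button_reply"),
     ("product_", "product_detail")]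

-- A's 'for prefix, intent in …items(): if message.startswith(prefix): return intent' loop
def pvIntentLoop : List (String × String) → String → String
  | [], _ => "interactive_response"
  | (pfx, intent) :: rest, message =>
      if PySem.Str.startswith message pfx then intent else pvIntentLoop rest message

def analyze_interactive_intent_py (message : String) : String :=
  pvIntentLoop pvInteractivePrefixes.items message

-- ===== PORT B =====
def analyze_interactive_intent_py_alt (message : String) : String :=
  let i := PySem.Str.find message "_"
  if i = -1 then "interactive_response"
  else PySem.Dict.getD pvInteractivePrefixes
         (PySem.Str.slice message none (some (i + 1))) "interactive_response"

-- ===== PRECONDITION & SPEC =====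
def Spec_analyze_interactive_intent_py (message : String) (out : String) : Prop := out = analyze_interactive_intent_py_alt message
instance (message : String) (out : String) : Decidable (Spec_analyze_interactive_intent_py message out) := by unfold Spec_analyze_interactive_intent_py; infer_instance

-- ===== CLAIM (what is proved, stated in full; the proofs are below) =====
def Claim_equal_analyze_interactive_intent_py : Prop := ∀ (message : String), Dom_analyze_interactive_intent_py message → Spec_analyze_interactive_intent_py message (analyze_interactive_intent_py message)

-- ===== LEMMAS AND PROOFS =====

-- a one-char list is a prefix of cs.drop j exactly when cs[j]? is that char
theorem pv_single_prefix (cs : List Char) (j : Nat) (a : Char) :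
    ([a] <+: cs.drop j) ↔ cs[j]? = some a := by
  rw [← List.head?_drop]
  cases cs.drop j with
  | nil => simp
  | cons b t => simp [List.cons_prefix_cons, eq_comm]

-- if cs contains no '_', no prefix of the shape w ++ "_" matches
theorem pv_no_underscore (cs : List Char) (h : ¬ ['_'] <:+: cs) (w : List Char) :
    PySem.Chars.startswith cs (w ++ ['_']) = false := by
  rw [Bool.eq_false_iff]
  intro hp
  rw [PySem.Chars.startswith_iff] at hp
  exact h (((List.suffix_append w ['_']).isInfix).trans hp.isInfix)

-- with i the index of the FIRST '_' in cs: a '_'-free w makes w ++ "_" a prefix of cs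
-- exactly when cs.take (i+1) is w ++ "_"
theorem pv_key_iff (cs : List Char) (i : Nat) (w : List Char)
    (hi : cs[i]? = some '_') (hmin : ∀ j, j < i → cs[j]? ≠ some '_') (hw : '_' ∉ w) :
    PySem.Chars.startswith cs (w ++ ['_']) = true ↔ cs.take (i + 1) = w ++ ['_'] := by
  rw [PySem.Chars.startswith_iff]
  constructor
  · intro hp
    obtain ⟨t, ht⟩ := hp
    simp only [List.append_assoc, List.singleton_append] at ht
    have hiw : i = w.length := by
      rcases lt_trichotomy i w.length with h | h | h
      · exfalso
        rw [← ht, List.getElem?_append_left h] at hi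
        obtain ⟨hlt, he⟩ := List.getElem?_eq_some_iff.mp hi
        exact hw (he ▸ List.getElem_mem hlt)
      · exact h
      · exfalso
        have hc : cs[w.length]? = some '_' := by
          rw [← ht, List.getElem?_append_right (le_refl _)]
          simp
        exact hmin w.length h hc
    subst hiw
    rw [← ht, List.take_append]
    simp
  · intro hk
    have := List.take_prefix (i + 1) cs
    rw [hk] at this
    exact this

-- the literal dict evaluates to its pair list (all five keys distinct)
theorem pv_items_eq :
    pvInteractivePrefixes.items =
      [("buy_", "interactive_button_reply"),
       ("more_", "interactive_button_reply"),
       ("similar_", "interactive_button_reply"),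
       ("option_", "interactive_button_reply"),
       ("product_", "product_detail")] := by
  decide

theorem pv_AB (message : String) :
    analyze_interactive_intent_py message = analyze_interactive_intent_py_alt message := by
  have hbuy : "buy_".toList = ['b', 'u', 'y'] ++ ['_'] := rfl
  have hmore : "more_".toList = ['m', 'o', 'r', 'e'] ++ ['_'] := rfl
  have hsim : "similar_".toList = ['s', 'i', 'm', 'i', 'l', 'a', 'r'] ++ ['_'] := rfl
  have hopt : "option_".toList = ['o', 'p', 't', 'i', 'o', 'n'] ++ ['_'] := rfl
  have hprod : "product_".toList = ['p', 'r', 'o', 'd', 'u', 'c', 't'] ++ ['_'] := rfl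
  have hund : "_".toList = ['_'] := rfl
  simp only [analyze_interactive_intent_py, pv_items_eq, pvIntentLoop,
    analyze_interactive_intent_py_alt, PySem.Str.startswith_eq, PySem.Str.find_eq,
    hbuy, hmore, hsim, hopt, hprod, hund, List.cons_append, List.nil_append]
  set cs := message.toList with hcs
  by_cases hf : PySem.Chars.find cs ['_'] = -1
  · have hno : ¬ ['_'] <:+: cs := (PySem.Chars.find_eq_neg_one_iff (s := cs) (sub := ['_'])).mp hf
    have s1 : PySem.Chars.startswith cs ['b', 'u', 'y', '_'] = false :=
      pv_no_underscore cs hno ['b', 'u', 'y']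
    have s2 : PySem.Chars.startswith cs ['m', 'o', 'r', 'e', '_'] = false :=
      pv_no_underscore cs hno ['m', 'o', 'r', 'e']
    have s3 : PySem.Chars.startswith cs ['s', 'i', 'm', 'i', 'l', 'a', 'r', '_'] = false :=
      pv_no_underscore cs hno ['s', 'i', 'm', 'i', 'l', 'a', 'r']
    have s4 : PySem.Chars.startswith cs ['o', 'p', 't', 'i', 'o', 'n', '_'] = false :=
      pv_no_underscore cs hno ['o', 'p', 't', 'i', 'o', 'n']
    have s5 : PySem.Chars.startswith cs ['p', 'r', 'o', 'd', 'u', 'c', 't', '_'] = false :=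
      pv_no_underscore cs hno ['p', 'r', 'o', 'd', 'u', 'c', 't']
    simp [hf, s1, s2, s3, s4, s5]
  · have h0 : 0 ≤ PySem.Chars.find cs ['_'] := by
      have := PySem.Chars.neg_one_le_find (s := cs) (sub := ['_'])
      omega
    obtain ⟨hpre, hmins⟩ := PySem.Chars.find_spec (s := cs) (sub := ['_']) h0
    set f := PySem.Chars.find cs ['_'] with hfdef
    set i := f.toNat with hidef
    have hi : cs[i]? = some '_' := (pv_single_prefix cs i '_').mp hpre
    have hmin : ∀ j, j < i → cs[j]? ≠ some '_' := by
      intro j hj hcj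
      exact hmins j hj ((pv_single_prefix cs j '_').mpr hcj)
    have hK : (PySem.Str.slice message none (some (f + 1))).toList = cs.take (i + 1) := by
      have hsl : PySem.List.slice cs none (some (f + 1)) = cs.take (f + 1).toNat := by
        first
          | exact PySem.List.slice_to (by omega)
          | exact PySem.List.slice_to _ (by omega)
      rw [PySem.Str.toList_slice, PySem.Chars.slice_eq_listSlice, ← hcs, hsl]
      congr 1
      omega
    rw [if_neg hf]
    set K := PySem.Str.slice message none (some (f + 1)) with hKdef
    by_cases c1 : cs.take (i + 1) = ['b', 'u', 'y'] ++ ['_']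
    · have hs : PySem.Chars.startswith cs ['b', 'u', 'y', '_'] = true :=
        (pv_key_iff cs i ['b', 'u', 'y'] hi hmin (by decide)).mpr c1
      have hKeq : K = "buy_" := String.toList_inj.mp (by rw [hK, c1, hbuy])
      rw [hs, hKeq]
      show "interactive_button_reply" = pvInteractivePrefixes.getD "buy_" "interactive_response"
      decide
    · have hs1 : PySem.Chars.startswith cs ['b', 'u', 'y', '_'] = false := by
        rw [Bool.eq_false_iff]
        intro h
        exact c1 ((pv_key_iff cs i ['b', 'u', 'y'] hi hmin (by decide)).mp h)
      by_cases c2 : cs.take (i + 1) = ['m', 'o', 'r', 'e'] ++ ['_']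
      · have hs : PySem.Chars.startswith cs ['m', 'o', 'r', 'e', '_'] = true :=
          (pv_key_iff cs i ['m', 'o', 'r', 'e'] hi hmin (by decide)).mpr c2
        have hKeq : K = "more_" := String.toList_inj.mp (by rw [hK, c2, hmore])
        rw [hs1, hs, hKeq]
        show "interactive_button_reply" = pvInteractivePrefixes.getD "more_" "interactive_response"
        decide
      · have hs2 : PySem.Chars.startswith cs ['m', 'o', 'r', 'e', '_'] = false := by
          rw [Bool.eq_false_iff]
          intro h
          exact c2 ((pv_key_iff cs i ['m', 'o', 'r', 'e'] hi hmin (by decide)).mp h)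
        by_cases c3 : cs.take (i + 1) = ['s', 'i', 'm', 'i', 'l', 'a', 'r'] ++ ['_']
        · have hs : PySem.Chars.startswith cs ['s', 'i', 'm', 'i', 'l', 'a', 'r', '_'] = true :=
            (pv_key_iff cs i ['s', 'i', 'm', 'i', 'l', 'a', 'r'] hi hmin (by decide)).mpr c3
          have hKeq : K = "similar_" := String.toList_inj.mp (by rw [hK, c3, hsim])
          rw [hs1, hs2, hs, hKeq]
          show "interactive_button_reply" = pvInteractivePrefixes.getD "similar_" "interactive_response"
          decide
        · have hs3 : PySem.Chars.startswith cs ['s', 'i', 'm', 'i', 'l', 'a', 'r', '_'] = false := by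
            rw [Bool.eq_false_iff]
            intro h
            exact c3 ((pv_key_iff cs i ['s', 'i', 'm', 'i', 'l', 'a', 'r'] hi hmin (by decide)).mp h)
          by_cases c4 : cs.take (i + 1) = ['o', 'p', 't', 'i', 'o', 'n'] ++ ['_']
          · have hs : PySem.Chars.startswith cs ['o', 'p', 't', 'i', 'o', 'n', '_'] = true :=
              (pv_key_iff cs i ['o', 'p', 't', 'i', 'o', 'n'] hi hmin (by decide)).mpr c4
            have hKeq : K = "option_" := String.toList_inj.mp (by rw [hK, c4, hopt])
            rw [hs1, hs2, hs3, hs, hKeq]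
            show "interactive_button_reply" = pvInteractivePrefixes.getD "option_" "interactive_response"
            decide
          · have hs4 : PySem.Chars.startswith cs ['o', 'p', 't', 'i', 'o', 'n', '_'] = false := by
              rw [Bool.eq_false_iff]
              intro h
              exact c4 ((pv_key_iff cs i ['o', 'p', 't', 'i', 'o', 'n'] hi hmin (by decide)).mp h)
            by_cases c5 : cs.take (i + 1) = ['p', 'r', 'o', 'd', 'u', 'c', 't'] ++ ['_']
            · have hs : PySem.Chars.startswith cs ['p', 'r', 'o', 'd', 'u', 'c', 't', '_'] = true :=
                (pv_key_iff cs i ['p', 'r', 'o', 'd', 'u', 'c', 't'] hi hmin (by decide)).mpr c5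
              have hKeq : K = "product_" := String.toList_inj.mp (by rw [hK, c5, hprod])
              rw [hs1, hs2, hs3, hs4, hs, hKeq]
              show "product_detail" = pvInteractivePrefixes.getD "product_" "interactive_response"
              decide
            · have hs5 : PySem.Chars.startswith cs ['p', 'r', 'o', 'd', 'u', 'c', 't', '_'] = false := by
                rw [Bool.eq_false_iff]
                intro h
                exact c5 ((pv_key_iff cs i ['p', 'r', 'o', 'd', 'u', 'c', 't'] hi hmin (by decide)).mp h)
              have n1 : ("buy_" == K) = false := by
                rw [beq_eq_false_iff_ne]
                intro hEq
                exact c1 (by rw [← hK, ← hEq, hbuy])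
              have n2 : ("more_" == K) = false := by
                rw [beq_eq_false_iff_ne]
                intro hEq
                exact c2 (by rw [← hK, ← hEq, hmore])
              have n3 : ("similar_" == K) = false := by
                rw [beq_eq_false_iff_ne]
                intro hEq
                exact c3 (by rw [← hK, ← hEq, hsim])
              have n4 : ("option_" == K) = false := by
                rw [beq_eq_false_iff_ne]
                intro hEq
                exact c4 (by rw [← hK, ← hEq, hopt])
              have n5 : ("product_" == K) = false := by
                rw [beq_eq_false_iff_ne]
                intro hEq
                exact c5 (by rw [← hK, ← hEq, hprod])
              rw [hs1, hs2, hs3, hs4, hs5]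
              show "interactive_response" = pvInteractivePrefixes.getD K "interactive_response"
              have hmk : pvInteractivePrefixes = PySem.Dict.mk
                  [("buy_", "interactive_button_reply"),
                   ("more_", "interactive_button_reply"),
                   ("similar_", "interactive_button_reply"),
                   ("option_", "interactive_button_reply"),
                   ("product_", "product_detail")] := by decide
              rw [PySem.Dict.getD_eq_get?_getD, hmk]
              simp [n1, n2, n3, n4, n5, PySem.Dict.get?]

-- ===== VERDICT (by name: the statement is the Claim_ definition above) =====
theorem analyze_interactive_intent_py_spec : Claim_equal_analyze_interactive_intent_py := by
  intro message _
  unfold Spec_analyze_interactive_intent_py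
  exact pv_AB message
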